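-- pv_equiv track=rewrite | github.com/TheShr/FedCRA | helpers/utils_.py | network_categories_features
-- ===== SOURCE A (Python) =====
-- from typing import List, Union, Dict, Optional, Any
--
-- def network_categories_features(list_features: List[str]) -> Dict[str, List[str]]:
--     """
--
--     :param list_features: List of features
--     :return: Dictionary with the features of each network category.
--     """
--     network_categories = {
--         'HpHp': [],
--         'HH': [],
--         'MI': [],
--         'H': [],
--         'HH_jit': [],
--     }
--     for feature in list_features:
--         if feature.startswith('MI'):
--             network_categories['MI'].append(feature)
--         if feature.startswith('HH'):
--             if feature.startswith('HH_jit'):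
--                 network_categories['HH_jit'].append(feature)
--             else:
--                 network_categories['HH'].append(feature)
--         if feature.startswith('HpHp'):
--             network_categories['HpHp'].append(feature)
--         if feature.startswith('H_'):
--             network_categories['H'].append(feature)
--     return network_categories
-- ===== SOURCE B (Python) =====
-- from typing import List, Dict
--
-- def network_categories_features(list_features: List[str]) -> Dict[str, List[str]]:
--     return {
--         'HpHp': [f for f in list_features if f.startswith('HpHp')],
--         'HH': [f for f in list_features if f.startswith('HH') and not f.startswith('HH_jit')],
--         'MI': [f for f in list_features if f.startswith('MI')],
--         'H': [f for f in list_features if f.startswith('H_')],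
--         'HH_jit': [f for f in list_features if f.startswith('HH_jit')],
--     }
-- ===== Notes on version B (the rewrite author's own statement) =====
-- stated objective: simpler
-- what changed: Replaces the single conditional-append pass over a mutable dict with a direct dict literal of five independent filtering comprehensions, one per category.
import Mathlib
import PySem

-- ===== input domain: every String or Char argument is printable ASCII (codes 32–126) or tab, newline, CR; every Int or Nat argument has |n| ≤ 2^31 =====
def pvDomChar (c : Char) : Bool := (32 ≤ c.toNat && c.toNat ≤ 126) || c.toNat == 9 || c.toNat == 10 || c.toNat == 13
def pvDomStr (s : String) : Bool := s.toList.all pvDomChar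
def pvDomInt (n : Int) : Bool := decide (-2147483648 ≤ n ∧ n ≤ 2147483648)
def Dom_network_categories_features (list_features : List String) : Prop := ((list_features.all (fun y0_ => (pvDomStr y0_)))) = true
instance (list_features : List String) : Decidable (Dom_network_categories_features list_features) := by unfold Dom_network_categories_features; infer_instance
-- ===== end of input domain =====

-- B replaces A's single conditional-append pass over a mutable dict with five independent filters, one per category (objective: simpler).

-- ===== PORT A =====
-- the loop body of A: four successive conditional appends into the dict
def pvStepA (d : PySem.Dict String (List String)) (feature : String) : PySem.Dict String (List String) :=
  let d := if PySem.Str.startswith feature "MI" then d.modify "MI" [] (· ++ [feature]) else d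
  let d := if PySem.Str.startswith feature "HH" then
             (if PySem.Str.startswith feature "HH_jit" then d.modify "HH_jit" [] (· ++ [feature])
              else d.modify "HH" [] (· ++ [feature]))
           else d
  let d := if PySem.Str.startswith feature "HpHp" then d.modify "HpHp" [] (· ++ [feature]) else d
  if PySem.Str.startswith feature "H_" then d.modify "H" [] (· ++ [feature]) else d

def network_categories_features (list_features : List String) : List (String × List String) :=
  let network_categories : PySem.Dict String (List String) :=
    PySem.Dict.ofList [("HpHp", []), ("HH", []), ("MI", []), ("H", []), ("HH_jit", [])]
  (list_features.foldl pvStepA network_categories).items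

-- ===== PORT B =====
def network_categories_features_alt (list_features : List String) : List (String × List String) :=
  [ ("HpHp", list_features.filter (fun f => PySem.Str.startswith f "HpHp")),
    ("HH", list_features.filter (fun f => PySem.Str.startswith f "HH" && !PySem.Str.startswith f "HH_jit")),
    ("MI", list_features.filter (fun f => PySem.Str.startswith f "MI")),
    ("H", list_features.filter (fun f => PySem.Str.startswith f "H_")),
    ("HH_jit", list_features.filter (fun f => PySem.Str.startswith f "HH_jit")) ]

-- ===== PRECONDITION & SPEC =====
def Spec_network_categories_features (list_features : List String) (out : List (String × List String)) : Prop := out = network_categories_features_alt list_features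
instance (list_features : List String) (out : List (String × List String)) : Decidable (Spec_network_categories_features list_features out) := by unfold Spec_network_categories_features; infer_instance

-- ===== CLAIM (what is proved, stated in full; the proofs are below) =====
def Claim_equal_network_categories_features : Prop := ∀ (list_features : List String), Dom_network_categories_features list_features → Spec_network_categories_features list_features (network_categories_features list_features)

-- ===== LEMMAS AND PROOFS =====

-- a dict state with the five fixed keys
def pvMkd (a b c d e : List String) : PySem.Dict String (List String) :=
  PySem.Dict.mk [("HpHp", a), ("HH", b), ("MI", c), ("H", d), ("HH_jit", e)]

theorem pvHHjit_imp_HH (f : String) (h : PySem.Str.startswith f "HH_jit" = true) :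
    PySem.Str.startswith f "HH" = true := by
  rw [PySem.Str.startswith_eq] at *
  rw [PySem.Chars.startswith_iff] at *
  exact List.IsPrefix.trans (by decide) h

theorem pvModify_HpHp (a b c d e : List String) (f : String) :
    (pvMkd a b c d e).modify "HpHp" [] (· ++ [f]) = pvMkd (a ++ [f]) b c d e := by
  simp [pvMkd, PySem.Dict.modify, PySem.Dict.contains, PySem.Dict.getD, PySem.Dict.get?, PySem.Dict.insert]

theorem pvModify_HH (a b c d e : List String) (f : String) :
    (pvMkd a b c d e).modify "HH" [] (· ++ [f]) = pvMkd a (b ++ [f]) c d e := by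
  simp [pvMkd, PySem.Dict.modify, PySem.Dict.contains, PySem.Dict.getD, PySem.Dict.get?, PySem.Dict.insert]

theorem pvModify_MI (a b c d e : List String) (f : String) :
    (pvMkd a b c d e).modify "MI" [] (· ++ [f]) = pvMkd a b (c ++ [f]) d e := by
  simp [pvMkd, PySem.Dict.modify, PySem.Dict.contains, PySem.Dict.getD, PySem.Dict.get?, PySem.Dict.insert]

theorem pvModify_H (a b c d e : List String) (f : String) :
    (pvMkd a b c d e).modify "H" [] (· ++ [f]) = pvMkd a b c (d ++ [f]) e := by
  simp [pvMkd, PySem.Dict.modify, PySem.Dict.contains, PySem.Dict.getD, PySem.Dict.get?, PySem.Dict.insert]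

theorem pvModify_HH_jit (a b c d e : List String) (f : String) :
    (pvMkd a b c d e).modify "HH_jit" [] (· ++ [f]) = pvMkd a b c d (e ++ [f]) := by
  simp [pvMkd, PySem.Dict.modify, PySem.Dict.contains, PySem.Dict.getD, PySem.Dict.get?, PySem.Dict.insert]

theorem pvStepA_mkd (f : String) (a b c d e : List String) :
    pvStepA (pvMkd a b c d e) f =
      pvMkd (if PySem.Str.startswith f "HpHp" then a ++ [f] else a)
            (if PySem.Str.startswith f "HH" && !PySem.Str.startswith f "HH_jit" then b ++ [f] else b)
            (if PySem.Str.startswith f "MI" then c ++ [f] else c)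
            (if PySem.Str.startswith f "H_" then d ++ [f] else d)
            (if PySem.Str.startswith f "HH_jit" then e ++ [f] else e) := by
  unfold pvStepA
  by_cases hj : PySem.Str.startswith f "HH_jit" = true
  · have hh := pvHHjit_imp_HH f hj
    simp only [hj, hh, Bool.not_true, Bool.and_false, if_true]
    split_ifs <;>
      simp_all [pvModify_MI, pvModify_HH_jit, pvModify_HpHp, pvModify_H]
  · simp only [Bool.not_eq_true] at hj
    simp only [hj, Bool.not_false, Bool.and_true, Bool.false_eq_true, if_false]
    split_ifs <;>
      simp_all [pvModify_MI, pvModify_HH, pvModify_HpHp, pvModify_H]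

theorem pvFoldl_mkd (xs : List String) (a b c d e : List String) :
    (xs.foldl pvStepA (pvMkd a b c d e)).items =
      [ ("HpHp", a ++ xs.filter (fun f => PySem.Str.startswith f "HpHp")),
        ("HH", b ++ xs.filter (fun f => PySem.Str.startswith f "HH" && !PySem.Str.startswith f "HH_jit")),
        ("MI", c ++ xs.filter (fun f => PySem.Str.startswith f "MI")),
        ("H", d ++ xs.filter (fun f => PySem.Str.startswith f "H_")),
        ("HH_jit", e ++ xs.filter (fun f => PySem.Str.startswith f "HH_jit")) ] := by
  induction xs generalizing a b c d e with
  | nil => simp [pvMkd]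
  | cons x xs ih =>
    rw [List.foldl_cons, pvStepA_mkd, ih]
    simp [List.filter_cons]
    split_ifs <;> simp

-- ===== VERDICT (by name: the statement is the Claim_ definition above) =====
theorem network_categories_features_spec : Claim_equal_network_categories_features := by
  intro xs _
  show network_categories_features xs = network_categories_features_alt xs
  unfold network_categories_features network_categories_features_alt
  have : PySem.Dict.ofList [("HpHp", ([] : List String)), ("HH", []), ("MI", []), ("H", []), ("HH_jit", [])] = pvMkd [] [] [] [] [] := by decide
  rw [this, pvFoldl_mkd]
  simp
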